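-- pv_equiv track=rewrite | github.com/Green-JEONG/cote | programmers/알고리즘_고득점_kit/heap/1.py | solution
-- ===== SOURCE A (Python) =====
-- import heapq
--
-- def solution(scoville, K):
--     heapq.heapify(scoville) # 리스트 -> 최소 힙으로 변환
--     count = 0
--
--     while scoville[0] < K: # 가장 작은 값이 K보다 작으면 계속
--         if len(scoville) < 2:
--             return -1
--
--         # 현재 시점에서 제일 작은 두 개 빼야하므로 while문 밖 X
--         first = heapq.heappop(scoville)
--         second = heapq.heappop(scoville)
--
--         new = first + (second * 2)
--         heapq.heappush(scoville, new)
--         count += 1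
--
--     return count
-- ===== SOURCE B (Python) =====
-- def solution(scoville, K):
--     # Keep a sorted working list instead of a heap; returns the same count.
--     # (A reorders the argument into a heap in place; B does not mutate it.)
--     s = sorted(scoville)
--     count = 0
--     while s[0] < K:
--         if len(s) < 2:
--             return -1
--         new = s[0] + s[1] * 2
--         rest = s[2:]
--         i = 0
--         while i < len(rest) and rest[i] < new:
--             i += 1
--         rest.insert(i, new)
--         s = rest
--         count += 1
--     return count
-- ===== Notes on version B (the rewrite author's own statement) =====
-- stated objective: alternative
-- what changed: Replaces the heapq min-heap with a list sorted once up front and kept sorted by in-place ordered insertion of each merged value, popping the two smallest from the front.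
import Mathlib
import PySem

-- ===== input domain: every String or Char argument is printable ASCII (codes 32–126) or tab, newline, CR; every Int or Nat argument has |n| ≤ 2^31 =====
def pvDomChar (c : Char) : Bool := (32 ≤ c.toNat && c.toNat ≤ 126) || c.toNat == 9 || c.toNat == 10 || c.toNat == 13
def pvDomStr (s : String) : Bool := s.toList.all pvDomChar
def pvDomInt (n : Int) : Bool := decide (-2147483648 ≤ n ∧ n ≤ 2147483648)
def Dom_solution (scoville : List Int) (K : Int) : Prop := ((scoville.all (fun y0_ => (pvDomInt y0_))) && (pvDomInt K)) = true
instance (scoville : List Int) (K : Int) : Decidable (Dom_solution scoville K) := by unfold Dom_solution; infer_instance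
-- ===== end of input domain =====

-- B replaces A's heap by a sorted working list with linear insertion: a different data structure, same count (return value only; A reorders its argument in place, B does not).


-- length fact about remove?, needed by heapLoop's termination proof
theorem remove?_length {xs r : List Int} {v : Int}
    (h : PySem.List.remove? xs v = some r) : r.length + 1 = xs.length := by
  have hv : v ∈ xs := by
    by_contra hv
    rw [(PySem.List.remove?_eq_none_iff xs v).mpr hv] at h
    simp at h
  rw [PySem.List.remove?_eq_some_erase xs v hv] at h
  cases h
  have := List.length_erase_of_mem hv
  have := List.length_pos_of_mem hv
  omega

-- ===== PORT A =====
-- heapq calls are ported by their priority-queue contract: scoville[0] on the heap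
-- is the minimum (PySem.List.min?), heappop removes the first occurrence of the
-- minimum (PySem.List.remove?), heappush adds the element; the internal heap array
-- layout never influences A's return value.
def heapLoop (scoville : List Int) (K : Int) (count : Int) : Int :=
  match hm : PySem.List.min? scoville (fun x => x) with
  | none => -1  -- scoville[0] raises IndexError here; excluded by Pre_solution
  | some m =>
    if m < K then
      if scoville.length < 2 then -1
      else
        match hr : PySem.List.remove? scoville m with
        | none => -1  -- unreachable: m ∈ scoville
        | some r =>
          match hm2 : PySem.List.min? r (fun x => x) with
          | none => -1  -- unreachable: r ≠ []
          | some m2 =>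
            match hr2 : PySem.List.remove? r m2 with
            | none => -1  -- unreachable: m2 ∈ r
            | some r2 => heapLoop (r2 ++ [m + m2 * 2]) K (count + 1)
    else count
termination_by scoville.length
decreasing_by
  have h1 := remove?_length hr
  have h2 := remove?_length hr2
  simp; omega

def solution (scoville : List Int) (K : Int) : Int :=
  heapLoop scoville K 0

-- ===== PORT B =====
-- the inner 'while i < len(rest) and rest[i] < new: …; rest.insert(i, new)' loop
def insertSorted (x : Int) : List Int → List Int
  | [] => [x]
  | y :: t => if y < x then y :: insertSorted x t else x :: y :: t

theorem insertSorted_length (x : Int) (s : List Int) :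
    (insertSorted x s).length = s.length + 1 := by
  induction s with
  | nil => simp [insertSorted]
  | cons y t ih => simp [insertSorted]; split <;> simp [ih]

def altLoop (s : List Int) (K : Int) (count : Int) : Int :=
  match s with
  | [] => -1  -- s[0] raises IndexError here; excluded by Pre_solution
  | [x] => if x < K then -1 else count
  | x :: y :: t =>
    if x < K then altLoop (insertSorted (x + y * 2) t) K (count + 1) else count
termination_by s.length
decreasing_by
  simp [insertSorted_length]

def solution_alt (scoville : List Int) (K : Int) : Int :=
  altLoop (PySem.List.sorted scoville (fun x => x) false) K 0

-- ===== PRECONDITION & SPEC =====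
-- A evaluates scoville[0] on the empty list and raises IndexError; B raises there too.
def Pre_solution (scoville : List Int) (_K : Int) : Prop := scoville ≠ []
instance (scoville : List Int) (K : Int) : Decidable (Pre_solution scoville K) := by unfold Pre_solution; infer_instance
def pvWitness_solution : List Int × Int := ([1, 2, 3, 9, 10, 12], 7)

def Spec_solution (scoville : List Int) (K : Int) (out : Int) : Prop := out = solution_alt scoville K
instance (scoville : List Int) (K : Int) (out : Int) : Decidable (Spec_solution scoville K out) := by unfold Spec_solution; infer_instance

-- ===== CLAIM (what is proved, stated in full; the proofs are below) =====
def Claim_equal_solution : Prop := ∀ (scoville : List Int) (K : Int), Dom_solution scoville K → Pre_solution scoville K → Spec_solution scoville K (solution scoville K)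

-- ===== LEMMAS AND PROOFS =====

theorem insertSorted_perm (x : Int) (s : List Int) :
    (insertSorted x s).Perm (x :: s) := by
  induction s with
  | nil => simp [insertSorted]
  | cons y t ih =>
    simp only [insertSorted]
    split
    · exact ((ih.cons y).trans (List.Perm.swap x y t))
    · exact List.Perm.refl _

theorem insertSorted_pairwise (x : Int) (s : List Int)
    (hs : s.Pairwise (· ≤ ·)) : (insertSorted x s).Pairwise (· ≤ ·) := by
  induction s with
  | nil => simp [insertSorted]
  | cons y t ih =>
    rcases List.pairwise_cons.mp hs with ⟨hy, ht⟩
    simp only [insertSorted]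
    split
    · rename_i hlt
      refine List.pairwise_cons.mpr ⟨?_, ih ht⟩
      intro z hz
      rcases List.mem_cons.mp ((insertSorted_perm x t).mem_iff.mp hz) with h | h
      · exact le_of_lt (h ▸ hlt)
      · exact hy z h
    · rename_i hnlt
      refine List.pairwise_cons.mpr ⟨?_, hs⟩
      intro z hz
      rcases List.mem_cons.mp hz with h | h
      · exact h ▸ not_lt.mp hnlt
      · exact le_trans (not_lt.mp hnlt) (hy z h)

-- shorthand proofs about A's minimum-extraction step against the sorted list
theorem sorted_min_cons {l : List Int} {m : Int}
    (hm : PySem.List.min? l (fun x => x) = some m) :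
    PySem.List.sorted l (fun x => x) false
      = m :: PySem.List.sorted (l.erase m) (fun x => x) false := by
  have hmem : m ∈ l := PySem.List.min?_mem hm
  apply PySem.List.eq_of_perm_of_pairwise_le_of_injective (fun x => x) (fun a b h => h)
  · exact (PySem.List.sorted_perm l _ _).trans
      ((List.perm_cons_erase hmem).trans
        ((PySem.List.sorted_perm (l.erase m) _ _).cons m).symm)
  · exact PySem.List.sorted_pairwise l _
  · refine List.pairwise_cons.mpr ⟨?_, PySem.List.sorted_pairwise _ _⟩
    intro y hy
    have : y ∈ l := List.erase_subset ((PySem.List.mem_sorted _ _ _ _).mp hy)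
    exact PySem.List.min?_isMin hm y this

theorem sorted_append_single (r : List Int) (x : Int) :
    PySem.List.sorted (r ++ [x]) (fun y => y) false
      = insertSorted x (PySem.List.sorted r (fun y => y) false) := by
  apply PySem.List.eq_of_perm_of_pairwise_le_of_injective (fun y => y) (fun a b h => h)
  · refine (PySem.List.sorted_perm _ _ _).trans ?_
    refine List.Perm.trans ?_ (insertSorted_perm x _).symm
    exact (List.perm_append_comm).trans ((PySem.List.sorted_perm r _ _).cons x).symm
  · exact PySem.List.sorted_pairwise _ _
  · exact insertSorted_pairwise x _ (PySem.List.sorted_pairwise _ _)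

-- unfolding lemmas for the two loops
theorem altLoop_nil (K c : Int) : altLoop [] K c = -1 := by
  rw [altLoop.eq_def]

theorem altLoop_single (x K c : Int) :
    altLoop [x] K c = if x < K then -1 else c := by
  rw [altLoop.eq_def]

theorem altLoop_cons2 (x y : Int) (t : List Int) (K c : Int) :
    altLoop (x :: y :: t) K c
      = if x < K then altLoop (insertSorted (x + y * 2) t) K (c + 1) else c := by
  rw [altLoop.eq_def]

theorem altLoop_ge (x : Int) (s : List Int) (K c : Int) (hK : ¬ x < K) :
    altLoop (x :: s) K c = c := by
  cases s with
  | nil => rw [altLoop_single, if_neg hK]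
  | cons y t => rw [altLoop_cons2, if_neg hK]

theorem heapLoop_nil (K c : Int) : heapLoop [] K c = -1 := by
  rw [heapLoop.eq_def]
  simp [PySem.List.min?]

theorem heapLoop_ge {l : List Int} {m K : Int} (c : Int)
    (hm : PySem.List.min? l (fun x => x) = some m) (hK : ¬ m < K) :
    heapLoop l K c = c := by
  rw [heapLoop.eq_def]
  split
  · rename_i heq; rw [heq] at hm; cases hm
  · rename_i m' heq; rw [heq] at hm
    injection hm with hm
    subst hm
    exact if_neg hK

theorem heapLoop_short {l : List Int} {m K : Int} (c : Int)
    (hm : PySem.List.min? l (fun x => x) = some m) (hK : m < K)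
    (hlen : l.length < 2) : heapLoop l K c = -1 := by
  rw [heapLoop.eq_def]
  split
  · rename_i heq; rw [heq] at hm
  · rename_i m' heq; rw [heq] at hm
    cases hm
    rw [if_pos hK, if_pos hlen]

theorem heapLoop_step {l r r2 : List Int} {m m2 K : Int} (c : Int)
    (hm : PySem.List.min? l (fun x => x) = some m) (hK : m < K)
    (hlen : ¬ l.length < 2)
    (hr : PySem.List.remove? l m = some r)
    (hm2 : PySem.List.min? r (fun x => x) = some m2)
    (hr2 : PySem.List.remove? r m2 = some r2) :
    heapLoop l K c = heapLoop (r2 ++ [m + m2 * 2]) K (c + 1) := by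
  rw [heapLoop.eq_def]
  split
  · rename_i heq; rw [heq] at hm; cases hm
  · rename_i m' heq; rw [heq] at hm
    cases hm
    rw [if_pos hK, if_neg hlen]
    split
    · rename_i heq2; rw [heq2] at hr; cases hr
    · rename_i r' heq2; rw [heq2] at hr
      cases hr
      split
      · rename_i heq3; rw [heq3] at hm2; cases hm2
      · rename_i m2' heq3; rw [heq3] at hm2
        cases hm2
        split
        · rename_i heq4; rw [heq4] at hr2; cases hr2
        · rename_i r2' heq4; rw [heq4] at hr2
          cases hr2; rfl

theorem main_lemma : ∀ (n : Nat) (l : List Int) (K c : Int), l.length ≤ n →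
    heapLoop l K c = altLoop (PySem.List.sorted l (fun x => x) false) K c := by
  intro n
  induction n with
  | zero =>
    intro l K c h
    have hl : l = [] := List.length_eq_zero_iff.mp (Nat.le_zero.mp h)
    subst hl
    rw [heapLoop_nil, (PySem.List.sorted_eq_nil_iff [] (fun x : Int => x) false).mpr rfl, altLoop_nil]
  | succ n ih =>
    intro l K c hlen
    cases hl : l with
    | nil => rw [heapLoop_nil, (PySem.List.sorted_eq_nil_iff [] (fun x : Int => x) false).mpr rfl, altLoop_nil]
    | cons a t =>
      subst hl
      cases hm : PySem.List.min? (a :: t) (fun x => x) with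
      | none => exact absurd ((PySem.List.min?_eq_none_iff _ _).mp hm) (by simp)
      | some m =>
        have hmem : m ∈ a :: t := PySem.List.min?_mem hm
        have hr : PySem.List.remove? (a :: t) m = some ((a :: t).erase m) :=
          PySem.List.remove?_eq_some_erase _ m hmem
        have hS := sorted_min_cons hm
        by_cases hK : m < K
        · by_cases hshort : (a :: t).length < 2
          · -- a single element below K: both sides give -1
            have ht : t = [] := by simp at hshort; exact hshort
            subst ht
            have hma : m = a := by simpa using hmem
            subst hma
            rw [heapLoop_short c hm hK hshort, hS]
            simp [List.erase_cons_head]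
            rw [(PySem.List.sorted_eq_nil_iff ([] : List Int) (fun x => x) false).mpr rfl, altLoop_single, if_pos hK]
          · -- the merge step
            set r := (a :: t).erase m with hrdef
            have hrlen : r.length + 1 = (a :: t).length := remove?_length hr
            have hrne : r ≠ [] := by
              intro h0; rw [h0] at hrlen; simp at hrlen; simp [hrlen] at hshort
            cases hm2 : PySem.List.min? r (fun x => x) with
            | none => exact absurd ((PySem.List.min?_eq_none_iff _ _).mp hm2) hrne
            | some m2 =>
              have hmem2 : m2 ∈ r := PySem.List.min?_mem hm2
              have hr2 : PySem.List.remove? r m2 = some (r.erase m2) :=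
                PySem.List.remove?_eq_some_erase _ m2 hmem2
              have hS2 := sorted_min_cons hm2
              rw [heapLoop_step c hm hK hshort hr hm2 hr2, hS, hS2, altLoop_cons2,
                if_pos hK, ← sorted_append_single]
              have hrlen2 : (r.erase m2).length + 1 = r.length := remove?_length hr2
              exact ih (r.erase m2 ++ [m + m2 * 2]) K (c + 1) (by simp; omega)
        · rw [heapLoop_ge c hm hK, hS, altLoop_ge _ _ _ _ hK]

-- ===== VERDICT (by name: the statement is the Claim_ definition above) =====
theorem solution_spec : Claim_equal_solution := by
  intro scoville K _ _
  show solution scoville K = solution_alt scoville K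
  exact main_lemma scoville.length scoville K 0 le_rfl
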